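-- pv_equiv track=rewrite | github.com/boererik/SmartTraffic | python_backend/traffic.py | listVehicles
-- ===== SOURCE A (Python) =====
-- def listVehicles(startVehicles):
--     vehicleList = []
--     measured = 0
--     vehicle = ''
--     for i in (startVehicles):
--         if i == 'road':
--             if measured != 0:
--                 vehicleList.append([vehicle,measured])
--             vehicle = 'car'
--             measured = 0
--         if i != 'road':
--             measured+=1
--             if i == 'truck':
--                 vehicle = 'truck'
--     return vehicleList
-- ===== SOURCE B (Python) =====
-- def listVehicles(startVehicles):
--     # Pass 1: split into segments of non-'road' tokens; each 'road' closes a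
--     # segment (the trailing tokens after the last 'road' never form one).
--     segments = []
--     current = []
--     for token in startVehicles:
--         if token == 'road':
--             segments.append(current)
--             current = []
--         else:
--             current.append(token)
--     # Pass 2: emit [label, length] for each non-empty segment; the default
--     # label is '' for the very first segment and 'car' afterwards.
--     result = []
--     label = ''
--     for seg in segments:
--         if seg:
--             result.append(['truck' if 'truck' in seg else label, len(seg)])
--         label = 'car'
--     return result
-- ===== Notes on version B (the rewrite author's own statement) =====
-- stated objective: simpler
-- what changed: Replaces A's single stateful scan (counter + mutable label threaded through two sequential ifs) by a two-pass decomposition: split the input into road-delimited segments, then map each non-empty segment to its label and length.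
import Mathlib
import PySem

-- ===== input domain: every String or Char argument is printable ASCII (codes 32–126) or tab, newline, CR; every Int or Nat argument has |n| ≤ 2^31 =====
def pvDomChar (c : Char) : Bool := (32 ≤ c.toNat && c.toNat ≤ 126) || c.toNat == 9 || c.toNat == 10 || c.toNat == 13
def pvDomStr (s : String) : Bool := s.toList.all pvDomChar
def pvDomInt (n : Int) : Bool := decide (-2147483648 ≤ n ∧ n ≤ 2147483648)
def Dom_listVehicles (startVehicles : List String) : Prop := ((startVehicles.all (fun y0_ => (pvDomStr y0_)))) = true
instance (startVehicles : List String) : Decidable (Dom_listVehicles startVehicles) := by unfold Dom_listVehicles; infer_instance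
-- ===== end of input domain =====

-- B replaces A's single stateful scan by a two-pass decomposition (split into
-- road-delimited segments, then emit label/length per non-empty segment);
-- objective: simpler. Proven equal on all inputs.


-- ===== PORT A =====
-- state: (vehicleList, measured, vehicle); the two sequential ifs of A kept in order
def listVehiclesStep (st : List (String × Int) × Int × String) (i : String) :
    List (String × Int) × Int × String :=
  let st :=
    if i = "road" then
      ((if st.2.1 ≠ 0 then st.1 ++ [(st.2.2, st.2.1)] else st.1), 0, "car")
    else st
  if i ≠ "road" then
    (st.1, st.2.1 + 1, if i = "truck" then "truck" else st.2.2)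
  else st

def listVehicles (startVehicles : List String) : List (String × Int) :=
  (startVehicles.foldl listVehiclesStep ([], 0, "")).1

-- ===== PORT B =====
-- pass 1: split into road-delimited segments (trailing tokens dropped)
def splitStep (st : List (List String) × List String) (t : String) :
    List (List String) × List String :=
  if t = "road" then (st.1 ++ [st.2], []) else (st.1, st.2 ++ [t])

-- pass 2: emit (label, length) per non-empty segment; label '' then 'car'
def emitStep (st : List (String × Int) × String) (seg : List String) :
    List (String × Int) × String :=
  ((if seg ≠ [] then
      st.1 ++ [((if "truck" ∈ seg then "truck" else st.2), (seg.length : Int))]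
    else st.1), "car")

def listVehicles_alt (startVehicles : List String) : List (String × Int) :=
  let p := startVehicles.foldl splitStep ([], [])
  (p.1.foldl emitStep ([], "")).1

-- ===== PRECONDITION & SPEC =====
def Spec_listVehicles (startVehicles : List String) (out : List (String × Int)) : Prop := out = listVehicles_alt startVehicles
instance (startVehicles : List String) (out : List (String × Int)) : Decidable (Spec_listVehicles startVehicles out) := by unfold Spec_listVehicles; infer_instance

-- ===== CLAIM (what is proved, stated in full; the proofs are below) =====
def Claim_equal_listVehicles : Prop := ∀ (startVehicles : List String), Dom_listVehicles startVehicles → Spec_listVehicles startVehicles (listVehicles startVehicles)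

-- ===== LEMMAS AND PROOFS =====

-- the split fold only appends to the accumulated segment list
theorem splitStep_acc (xs : List String) (s0 : List (List String)) (cur : List String) :
    xs.foldl splitStep (s0, cur)
      = (s0 ++ (xs.foldl splitStep ([], cur)).1, (xs.foldl splitStep ([], cur)).2) := by
  induction xs generalizing s0 cur with
  | nil => simp
  | cons t rest ih =>
    simp only [List.foldl_cons, splitStep]
    by_cases h : t = "road" <;> simp [h]
    · rw [ih (s0 ++ [cur]) [], ih ([cur]) []]; simp
    · exact ih s0 (cur ++ [t])

-- main invariant: A's fold from a mid-segment state equals B's two passes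
theorem main_inv (xs : List String) (out : List (String × Int)) (label : String)
    (cur : List String) :
    (xs.foldl listVehiclesStep
        (out, (cur.length : Int), if "truck" ∈ cur then "truck" else label)).1
      = (((xs.foldl splitStep ([], cur)).1).foldl emitStep (out, label)).1 := by
  induction xs generalizing out label cur with
  | nil => simp
  | cons t rest ih =>
    simp only [List.foldl_cons]
    by_cases h : t = "road"
    · subst h
      have hstep : listVehiclesStep (out, (cur.length : Int),
          if "truck" ∈ cur then "truck" else label) "road"
          = ((if cur ≠ [] then
                out ++ [((if "truck" ∈ cur then "truck" else label), (cur.length : Int))]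
              else out), 0, "car") := by
        simp only [listVehiclesStep]
        by_cases hc : cur = []
        · simp [hc]
        · simp [hc]
      rw [hstep]
      have hB : splitStep ([], cur) "road" = ([cur], []) := by simp [splitStep]
      rw [hB, splitStep_acc rest [cur] []]
      rw [List.foldl_append]
      have hemit : emitStep (out, label) cur
          = ((if cur ≠ [] then
                out ++ [((if "truck" ∈ cur then "truck" else label), (cur.length : Int))]
              else out), "car") := by
        simp [emitStep]
      simp only [List.foldl_cons, hemit]
      have := ih (if cur ≠ [] then
          out ++ [((if "truck" ∈ cur then "truck" else label), (cur.length : Int))]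
        else out) "car" []
      simpa using this
    · have hstep : listVehiclesStep (out, (cur.length : Int),
          if "truck" ∈ cur then "truck" else label) t
          = (out, ((cur ++ [t]).length : Int),
             if "truck" ∈ cur ++ [t] then "truck" else label) := by
        by_cases ht : t = "truck" <;> by_cases hm : "truck" ∈ cur <;>
          simp [listVehiclesStep, h, ht, hm, List.mem_append] <;> push_cast <;>
          first
            | omega
            | (intro h'; exact absurd h'.symm ht)
      rw [hstep]
      have hB : splitStep ([], cur) t = ([], cur ++ [t]) := by simp [splitStep, h]
      rw [hB]
      exact ih out label (cur ++ [t])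

-- ===== VERDICT (by name: the statement is the Claim_ definition above) =====
theorem listVehicles_spec : Claim_equal_listVehicles := by
  intro xs _
  show listVehicles xs = listVehicles_alt xs
  have := main_inv xs [] "" []
  simpa [listVehicles, listVehicles_alt] using this
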